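-- pv_equiv track=rewrite | github.com/Flacarel/Python-Bombica-Sebastian-3E2 | Lab1/lab1.py | extragere
-- ===== SOURCE A (Python) =====
-- def extragere(cuvant):
--     numar = ""
--     for i in cuvant:
--         if i.isdigit():
--             numar += i
--         elif numar:
--             break
--     if numar:
--         return int(numar)
--     else:
--         return None
-- ===== SOURCE B (Python) =====
-- from itertools import groupby
--
-- def extragere(cuvant):
--     for is_digit, grp in groupby(cuvant, key=str.isdigit):
--         if is_digit:
--             return int(''.join(grp))
--     return None
-- ===== Notes on version B (the rewrite author's own statement) =====
-- stated objective: idiomatic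
-- what changed: Replaces the character-by-character accumulate-then-break loop with itertools.groupby(key=str.isdigit): scan maximal runs and return int of the first digit run, else None.
import Mathlib
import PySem

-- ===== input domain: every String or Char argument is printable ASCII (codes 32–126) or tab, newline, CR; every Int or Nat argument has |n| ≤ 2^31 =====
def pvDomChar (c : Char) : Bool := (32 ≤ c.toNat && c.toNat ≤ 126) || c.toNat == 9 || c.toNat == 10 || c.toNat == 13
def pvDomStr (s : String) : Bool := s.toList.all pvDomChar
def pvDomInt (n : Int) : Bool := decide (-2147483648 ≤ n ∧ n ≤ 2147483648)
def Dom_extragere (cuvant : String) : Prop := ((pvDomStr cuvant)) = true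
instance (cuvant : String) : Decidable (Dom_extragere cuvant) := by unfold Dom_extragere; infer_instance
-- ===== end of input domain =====

-- B replaces A's accumulate-then-break character loop with a groupby-by-isdigit scan
-- returning int of the first digit run (idiomatic; same cost).

-- ===== PORT A =====
-- the for-loop of A: state is the accumulated digit string `numar`
def extragereLoop : List Char → List Char → List Char
  | [], numar => numar
  | i :: rest, numar =>
    if PySem.Chars.isdigit i then extragereLoop rest (numar ++ [i])
    else if numar ≠ [] then numar
    else extragereLoop rest numar

def extragere (cuvant : String) : Option Int :=
  let numar := extragereLoop cuvant.toList []
  if numar ≠ [] then PySem.Int.ofChars? numar else none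

-- ===== PORT B =====
-- groupby(cuvant, key=str.isdigit): each group is the head char plus the run of
-- chars with the same key; on the first group with key True return int of the run.
def extragereAltLoop : List Char → Option Int
  | [] => none
  | c :: rest =>
    if _h : PySem.Chars.isdigit c then
      PySem.Int.ofChars? (c :: rest.takeWhile PySem.Chars.isdigit)
    else
      extragereAltLoop (rest.dropWhile (fun x => PySem.Chars.isdigit x == PySem.Chars.isdigit c))
  termination_by cs => cs.length
  decreasing_by
    simpa using Nat.lt_succ_of_le (List.length_dropWhile_le _ _)

def extragere_alt (cuvant : String) : Option Int :=
  extragereAltLoop cuvant.toList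

-- ===== PRECONDITION & SPEC =====
def Spec_extragere (cuvant : String) (out : Option Int) : Prop := out = extragere_alt cuvant
instance (cuvant : String) (out : Option Int) : Decidable (Spec_extragere cuvant out) := by unfold Spec_extragere; infer_instance

-- ===== CLAIM (what is proved, stated in full; the proofs are below) =====
def Claim_equal_extragere : Prop := ∀ (cuvant : String), Dom_extragere cuvant → Spec_extragere cuvant (extragere cuvant)

-- ===== LEMMAS AND PROOFS =====

-- once the accumulator is nonempty, A's loop appends the remaining digit run and stops
theorem extragereLoop_ne_nil (cs : List Char) (acc : List Char) (h : acc ≠ []) :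
    extragereLoop cs acc = acc ++ cs.takeWhile PySem.Chars.isdigit := by
  induction cs generalizing acc with
  | nil => simp [extragereLoop]
  | cons c rest ih =>
    by_cases hd : PySem.Chars.isdigit c
    · simp [extragereLoop, hd, ih (acc ++ [c]) (by simp)]
    · simp [extragereLoop, hd, h]

-- A's loop from the empty accumulator yields the first maximal digit run
theorem extragereLoop_nil (cs : List Char) :
    extragereLoop cs [] =
      (cs.dropWhile (fun c => !PySem.Chars.isdigit c)).takeWhile PySem.Chars.isdigit := by
  induction cs with
  | nil => simp [extragereLoop]
  | cons c rest ih =>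
    by_cases hd : PySem.Chars.isdigit c
    · simp [extragereLoop, hd,
        extragereLoop_ne_nil rest [c] (by simp)]
    · simp [extragereLoop, hd, ih]

theorem dropWhile_dropWhile {α : Type} (p : α → Bool) (l : List α) :
    (l.dropWhile p).dropWhile p = l.dropWhile p := by
  induction l with
  | nil => simp
  | cons a l ih =>
    by_cases h : p a
    · simpa [List.dropWhile_cons, h] using ih
    · simp [h]

-- B's groupby scan computes the same "first digit run, else none" result
theorem extragereAltLoop_eq (cs : List Char) :
    extragereAltLoop cs =
      (let run := (cs.dropWhile (fun c => !PySem.Chars.isdigit c)).takeWhile PySem.Chars.isdigit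
       if run ≠ [] then PySem.Int.ofChars? run else none) := by
  induction cs using extragereAltLoop.induct with
  | case1 => simp [extragereAltLoop]
  | case2 c rest h =>
    simp [extragereAltLoop, h]
  | case3 c rest h ih =>
    have hpred : (fun x => PySem.Chars.isdigit x == PySem.Chars.isdigit c)
        = (fun x => !PySem.Chars.isdigit x) := by
      funext x; simp [Bool.eq_false_iff.mpr h]
    rw [hpred] at ih
    rw [show extragereAltLoop (c :: rest)
          = extragereAltLoop (rest.dropWhile (fun x => PySem.Chars.isdigit x == PySem.Chars.isdigit c))
        from by rw [extragereAltLoop, dif_neg h], hpred, ih]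
    simp [h, dropWhile_dropWhile]

-- ===== VERDICT (by name: the statement is the Claim_ definition above) =====
theorem extragere_spec : Claim_equal_extragere := by
  intro cuvant _
  unfold Spec_extragere extragere extragere_alt
  rw [extragereLoop_nil, extragereAltLoop_eq]
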